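-- pv_equiv track=rewrite | github.com/Laudian/adventofcode | 2020/day10/python/part1.py | possiblePath
-- ===== SOURCE A (Python) =====
-- def possiblePath(start, end, path):
--     if not path: return end - start <= 3
--     if not path[0] - start <= 3: return False
--     for index, value in enumerate(path):
--         if index+1 < len(path):
--             if not path[index+1]-value <= 3: return False
--     if not end - path[-1] <= 3: return False
--     return True
-- ===== SOURCE B (Python) =====
-- def possiblePath(start, end, path):
--     # divide and conquer: the chain start..path..end has all gaps <= 3
--     # iff both halves around the middle element do
--     if not path:
--         return end - start <= 3
--     m = len(path) // 2
--     return possiblePath(start, path[m], path[:m]) and possiblePath(path[m], end, path[m+1:])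
-- ===== Notes on version B (the rewrite author's own statement) =====
-- stated objective: alternative
-- what changed: B replaces A's single indexed loop with separate start/end/boundary checks by a divide-and-conquer recursion: it splits the path at its middle element and checks the two half-chains recursively, with the empty path as base case.
import Mathlib
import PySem

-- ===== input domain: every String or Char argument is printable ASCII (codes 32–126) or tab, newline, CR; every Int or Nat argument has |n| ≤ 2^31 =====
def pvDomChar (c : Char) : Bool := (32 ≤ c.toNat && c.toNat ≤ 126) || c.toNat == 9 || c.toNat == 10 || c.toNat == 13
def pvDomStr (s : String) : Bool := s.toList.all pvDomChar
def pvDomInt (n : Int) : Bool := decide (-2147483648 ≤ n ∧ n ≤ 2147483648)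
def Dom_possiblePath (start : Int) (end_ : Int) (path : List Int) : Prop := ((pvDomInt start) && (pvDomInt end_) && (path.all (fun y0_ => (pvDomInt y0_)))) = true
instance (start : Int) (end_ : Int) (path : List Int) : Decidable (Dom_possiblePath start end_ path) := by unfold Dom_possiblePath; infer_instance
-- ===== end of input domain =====

-- B replaces A's indexed loop and separate start/end/first-last checks by a
-- divide-and-conquer recursion splitting the path at its middle element (alternative
-- decomposition; same result, no speed claimed).


-- ===== PORT A =====
-- the for-loop with its early return; path[index+1] is in range under the guard,
-- so pyGet? returns some and the getD 0 default is never used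
def possiblePathLoop (path : List Int) : List (Int × Int) → Bool
  | [] => true
  | (index, value) :: rest =>
    if index + 1 < (path.length : Int) then
      if ¬ ((PySem.List.pyGet? path (index + 1)).getD 0 - value ≤ 3) then false
      else possiblePathLoop path rest
    else possiblePathLoop path rest

def possiblePath (start : Int) (end_ : Int) (path : List Int) : Bool :=
  if path = [] then decide (end_ - start ≤ 3)
  else if ¬ ((PySem.List.pyGet? path 0).getD 0 - start ≤ 3) then false
  else if possiblePathLoop path (PySem.List.enumerate path 0) = false then false
  else if ¬ (end_ - (PySem.List.pyGet? path (-1)).getD 0 ≤ 3) then false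
  else true

-- ===== PORT B =====
-- divide and conquer on the path: path[:m] = take m, path[m+1:] = drop (m+1)
-- (both slice bounds are nonnegative and within range); len(path)//2 on the nonnegative
-- length is Nat division, which coincides with Python's //; path[m] is in range
-- since 0 ≤ m < len, so the getD 0 default is never used
def possiblePath_alt (start : Int) (end_ : Int) (path : List Int) : Bool :=
  if hp : path = [] then decide (end_ - start ≤ 3)
  else
    possiblePath_alt start ((PySem.List.pyGet? path ((path.length / 2 : Nat) : Int)).getD 0)
        (path.take (path.length / 2)) &&
      possiblePath_alt ((PySem.List.pyGet? path ((path.length / 2 : Nat) : Int)).getD 0) end_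
        (path.drop (path.length / 2 + 1))
termination_by path.length
decreasing_by
  · have h0 : path.length ≠ 0 := by simpa using hp
    simp only [List.length_take]
    omega
  · have h0 : path.length ≠ 0 := by simpa using hp
    simp only [List.length_drop]
    omega

-- ===== PRECONDITION & SPEC =====
def Spec_possiblePath (start : Int) (end_ : Int) (path : List Int) (out : Bool) : Prop := out = possiblePath_alt start end_ path
instance (start : Int) (end_ : Int) (path : List Int) (out : Bool) : Decidable (Spec_possiblePath start end_ path out) := by unfold Spec_possiblePath; infer_instance

-- ===== CLAIM (what is proved, stated in full; the proofs are below) =====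
def Claim_equal_possiblePath : Prop := ∀ (start : Int) (end_ : Int) (path : List Int), Dom_possiblePath start end_ path → Spec_possiblePath start end_ path (possiblePath start end_ path)

-- ===== LEMMAS AND PROOFS =====

/-- intermediate: adjacent-pair predicate on a bare list, mediating between A and B -/
def pairsAll (l : List Int) : Bool :=
  (l.zip l.tail).all (fun p => decide (p.2 - p.1 ≤ 3))

theorem pairsAll_cons_cons (a b : Int) (t : List Int) :
    pairsAll (a :: b :: t) = (decide (b - a ≤ 3) && pairsAll (b :: t)) := by
  simp [pairsAll]

theorem pairsAll_split : ∀ (xs : List Int) (y : Int) (ys : List Int),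
    pairsAll (xs ++ y :: ys) = (pairsAll (xs ++ [y]) && pairsAll (y :: ys))
  | [], y, ys => by simp [pairsAll]
  | [a], y, ys => by simp [pairsAll]
  | a :: b :: xs, y, ys => by
    have ih := pairsAll_split (b :: xs) y ys
    simp only [List.cons_append] at ih ⊢
    rw [pairsAll_cons_cons, pairsAll_cons_cons, ih, Bool.and_assoc]

theorem alt_eq_pairsAll (start end_ : Int) (path : List Int) :
    possiblePath_alt start end_ path = pairsAll (start :: (path ++ [end_])) := by
  rw [possiblePath_alt]
  split
  · rename_i hp; subst hp; simp [pairsAll]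
  · rename_i hp
    have h0 : path.length ≠ 0 := by simpa using hp
    have hm : path.length / 2 < path.length := by omega
    cases hpm : path[path.length / 2]? with
    | none =>
      exfalso
      rw [List.getElem?_eq_none_iff] at hpm
      omega
    | some pm =>
      have hpm' : path[path.length / 2] = pm := by
        rw [List.getElem?_eq_getElem hm] at hpm
        exact Option.some.inj hpm
      have hget : (PySem.List.pyGet? path ((path.length / 2 : Nat) : Int)).getD 0 = pm := by
        rw [PySem.List.pyGet?_natCast, hpm]
        rfl
      have hsplit : path = path.take (path.length / 2)
          ++ pm :: path.drop (path.length / 2 + 1) := by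
        conv_lhs => rw [← List.take_append_drop (path.length / 2) path]
        rw [List.drop_eq_getElem_cons hm, hpm']
      have ih1 := alt_eq_pairsAll start pm (path.take (path.length / 2))
      have ih2 := alt_eq_pairsAll pm end_ (path.drop (path.length / 2 + 1))
      rw [hget, ih1, ih2]
      conv_rhs => rw [hsplit]
      rw [show start :: ((path.take (path.length / 2)
            ++ pm :: path.drop (path.length / 2 + 1)) ++ [end_])
          = (start :: path.take (path.length / 2))
            ++ pm :: (path.drop (path.length / 2 + 1) ++ [end_]) by simp,
          pairsAll_split]
      simp
termination_by path.length
decreasing_by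
  · simp only [List.length_take]; omega
  · simp only [List.length_drop]; omega

theorem pairsAll_append_last (e : Int) : ∀ (l : List Int), l ≠ [] →
    pairsAll (l ++ [e]) = (pairsAll l && decide (e - l.getLastD 0 ≤ 3))
  | [], h => absurd rfl h
  | [a], _ => by simp [pairsAll]
  | a :: b :: t, _ => by
    have ih := pairsAll_append_last e (b :: t) (by simp)
    simp only [List.cons_append] at ih ⊢
    rw [pairsAll_cons_cons, pairsAll_cons_cons, ih]
    simp [Bool.and_assoc, List.getLastD]

theorem loopA_eq : ∀ (suf pre : List Int),
    possiblePathLoop (pre ++ suf) (PySem.List.enumerate suf (pre.length : Int)) = pairsAll suf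
  | [], _ => by simp [PySem.List.enumerate_nil, possiblePathLoop, pairsAll]
  | [x], pre => by
    rw [PySem.List.enumerate_cons, PySem.List.enumerate_nil]
    unfold possiblePathLoop
    rw [if_neg (by simp)]
    simp [possiblePathLoop, pairsAll]
  | x :: y :: t, pre => by
    have ih := loopA_eq (y :: t) (pre ++ [x])
    rw [List.append_assoc] at ih
    have hlen : ((pre ++ [x]).length : Int) = (pre.length : Int) + 1 := by simp
    rw [hlen] at ih
    simp only [List.singleton_append] at ih
    rw [PySem.List.enumerate_cons]
    unfold possiblePathLoop
    have hlt : (pre.length : Int) + 1 < ((pre ++ x :: y :: t).length : Int) := by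
      simp only [List.length_append, List.length_cons]
      push_cast
      omega
    have hget : (PySem.List.pyGet? (pre ++ x :: y :: t) ((pre.length : Int) + 1)).getD 0 = y := by
      rw [show ((pre.length : Int) + 1) = ((pre.length + 1 : Nat) : Int) by omega,
          PySem.List.pyGet?_natCast, List.getElem?_append_right (by omega)]
      simp
    rw [if_pos hlt, hget, pairsAll_cons_cons]
    by_cases hy : y - x ≤ 3
    · rw [if_neg (by omega), ih]
      simp [hy]
    · rw [if_pos (by omega)]
      simp [hy]

-- ===== VERDICT (by name: the statement is the Claim_ definition above) =====
theorem possiblePath_spec : Claim_equal_possiblePath := by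
  intro start end_ path _
  unfold Spec_possiblePath possiblePath
  rw [alt_eq_pairsAll]
  cases path with
  | nil => simp [pairsAll]
  | cons p ps =>
    have hloop := loopA_eq (p :: ps) []
    simp only [List.nil_append, List.length_nil, Nat.cast_zero] at hloop
    have hB : pairsAll (start :: ((p :: ps) ++ [end_]))
        = (decide (p - start ≤ 3) && (pairsAll (p :: ps) && decide (end_ - (p :: ps).getLastD 0 ≤ 3))) := by
      rw [show (start :: ((p :: ps) ++ [end_])) = start :: p :: (ps ++ [end_]) by simp,
          pairsAll_cons_cons,
          show (p :: (ps ++ [end_])) = (p :: ps) ++ [end_] by simp,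
          pairsAll_append_last end_ (p :: ps) (by simp)]
    rw [hB, if_neg (by simp), hloop]
    have hgetlast : (PySem.List.pyGet? (p :: ps) (-1)).getD 0 = (p :: ps).getLastD 0 := by
      rw [PySem.List.pyGet?_neg_one]
      simp [List.getLastD_eq_getLast?]
    rw [PySem.List.pyGet?_zero_cons, hgetlast]
    by_cases h1 : p - start ≤ 3 <;> by_cases h2 : pairsAll (p :: ps) = true <;>
      by_cases h3 : end_ - (p :: ps).getLastD 0 ≤ 3 <;>
      simp_all
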